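-- pv_equiv track=rewrite | github.com/ombretta/most-replayed-data | evaluation/user_study/ranking_from_comparisons.py | build_sorted_shots
-- ===== SOURCE A (Python) =====
-- from collections import defaultdict
--
-- def build_sorted_shots(comparisons):
--     graph = defaultdict(list)
--     for item1, item2, result in comparisons:
--         if result == 1:
--             graph[item1].append(item2)
--         else:
--             graph[item2].append(item1)
--
--     visited = set()
--     ranking = []
--
--     def dfs(node):
--         visited.add(node)
--         for neighbor in graph[node]:
--             if neighbor not in visited:
--                 dfs(neighbor)
--         ranking.append(node)
--
--     for node in list(graph.keys()):
--         if node not in visited: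
--             dfs(node)
--
--     # ranking.reverse()
--     return ranking
-- ===== SOURCE B (Python) =====
-- from collections import defaultdict
--
-- def build_sorted_shots(comparisons):
--     graph = defaultdict(list)
--     for item1, item2, result in comparisons:
--         if result == 1:
--             graph[item1].append(item2)
--         else:
--             graph[item2].append(item1)
--
--     visited = set()
--     ranking = []
--
--     for root in list(graph.keys()):
--         if root in visited:
--             continue
--         visited.add(root)
--         stack = [(root, graph[root])]
--         while stack:
--             node, rest = stack[-1]
--             if not rest:
--                 stack.pop()
--                 ranking.append(node)
--             elif rest[0] in visited:
--                 stack[-1] = (node, rest[1:])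
--             else:
--                 nb = rest[0]
--                 stack[-1] = (node, rest[1:])
--                 visited.add(nb)
--                 stack.append((nb, graph[nb]))
--     return ranking
-- ===== Notes on version B (the rewrite author's own statement) =====
-- stated objective: alternative
-- what changed: The recursive dfs helper is replaced by an iterative DFS with an explicit stack of (node, remaining-neighbors) frames that marks nodes visited when pushed and appends them to the ranking when popped, reproducing the exact post-order without Python recursion.
import Mathlib
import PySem

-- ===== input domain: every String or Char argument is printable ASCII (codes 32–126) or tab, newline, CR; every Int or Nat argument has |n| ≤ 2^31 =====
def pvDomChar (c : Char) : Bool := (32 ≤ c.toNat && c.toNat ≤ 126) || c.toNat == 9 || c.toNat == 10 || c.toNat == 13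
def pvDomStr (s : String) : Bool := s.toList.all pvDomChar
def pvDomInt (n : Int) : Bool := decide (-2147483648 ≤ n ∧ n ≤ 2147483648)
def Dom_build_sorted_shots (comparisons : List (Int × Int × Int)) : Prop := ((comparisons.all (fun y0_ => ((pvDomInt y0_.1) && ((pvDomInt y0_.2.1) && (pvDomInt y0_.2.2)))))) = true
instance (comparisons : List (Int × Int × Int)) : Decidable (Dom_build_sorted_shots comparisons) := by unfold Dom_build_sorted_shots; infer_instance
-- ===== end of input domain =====

-- B replaces A's recursive dfs helper with an iterative explicit-stack DFS producing the
-- same post-order ranking (objective: alternative decomposition, same asymptotic cost).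

-- Shared helper: both Pythons build the same defaultdict(list) graph with the same loop.
def pvGraph (comparisons : List (Int × Int × Int)) : PySem.Dict Int (List Int) :=
  comparisons.foldl (fun g t =>
    if t.2.2 == 1 then g.modify t.1 [] (fun l => l ++ [t.2.1])
    else g.modify t.2.1 [] (fun l => l ++ [t.1])) PySem.Dict.empty

-- graph[node] read during dfs: a defaultdict returns [] for a missing key (the key it adds
-- then carries no neighbours and the key snapshot was taken before, so getD is exact).
def pvAdj (g : PySem.Dict Int (List Int)) (n : Int) : List Int := g.getD n []

-- all node labels occurring in the graph (termination measure universe only)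
def pvNodes (g : PySem.Dict Int (List Int)) : List Int := g.keys ++ g.values.flatten

-- number of graph/pending nodes not yet visited (termination measure only)
def pvMeas (g : PySem.Dict Int (List Int)) (extra : List Int) (v : List Int) : Nat :=
  ((pvNodes g ++ extra).toFinset \ v.toFinset).card

-- the three measure lemmas the ports' termination proofs cite
theorem pvMeas_le (g : PySem.Dict Int (List Int)) (A B v w : List Int)
    (hA : ∀ y ∈ A, y ∈ pvNodes g ∨ y ∈ B) (hvw : ∀ y ∈ v, y ∈ w) :
    pvMeas g A w ≤ pvMeas g B v := by
  apply Finset.card_le_card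
  intro y hy
  simp only [List.toFinset_append, Finset.mem_sdiff, Finset.mem_union, List.mem_toFinset] at hy ⊢
  refine ⟨?_, fun hv => hy.2 (hvw y hv)⟩
  rcases hy.1 with h | h
  · exact Or.inl h
  · exact hA y h

theorem pvMeas_lt (g : PySem.Dict Int (List Int)) (A B v w : List Int) (x : Int)
    (hA : ∀ y ∈ A, y ∈ pvNodes g ∨ y ∈ B) (hvw : ∀ y ∈ v, y ∈ w)
    (hxB : x ∈ B) (hxv : x ∉ v) (hxw : x ∈ w) :
    pvMeas g A w < pvMeas g B v := by
  apply Finset.card_lt_card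
  constructor
  · apply Finset.sdiff_subset_sdiff
    · intro y hy
      simp only [List.toFinset_append, Finset.mem_union, List.mem_toFinset] at hy ⊢
      rcases hy with h | h
      · exact Or.inl h
      · exact hA y h
    · intro y hy
      simp only [List.mem_toFinset] at hy ⊢
      exact hvw y hy
  · intro hsub
    have hx : x ∈ (pvNodes g ++ B).toFinset \ v.toFinset := by
      simp [List.mem_toFinset, hxB, hxv]
    have := hsub hx
    simp [List.mem_toFinset, hxw] at this

theorem pvAdj_subset (g : PySem.Dict Int (List Int)) (n : Int) :
    ∀ y ∈ pvAdj g n, y ∈ pvNodes g := by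
  intro y hy
  simp only [pvAdj, PySem.Dict.getD, PySem.Dict.get?] at hy
  rcases hf : List.find? (fun p => p.1 == n) g.items with _ | p
  · simp [hf] at hy
  · simp only [hf, Option.map_some, Option.getD_some] at hy
    have hp : p ∈ g.items := List.mem_of_find?_eq_some hf
    simp only [pvNodes, List.mem_append]
    right
    have hv : p.2 ∈ g.values := by
      simp only [PySem.Dict.values]
      exact List.mem_map.mpr ⟨p, hp, rfl⟩
    exact List.mem_flatten.mpr ⟨p.2, hv, hy⟩

theorem pvMemAddL {v : PySem.Set Int} {nb x : Int} (h : x ∈ v) : x ∈ PySem.Set.add v nb :=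
  (PySem.Set.mem_add v nb x).mpr (Or.inl h)

theorem pvMemAddSelf (v : PySem.Set Int) (nb : Int) : nb ∈ PySem.Set.add v nb :=
  (PySem.Set.mem_add v nb nb).mpr (Or.inr rfl)

-- ===== PORT A =====
-- A's recursive dfs, fused with its call sites' "if node not in visited" check: processing a
-- list of candidate nodes, dfs marks an unvisited node, recurses on its neighbours, then
-- appends it. The subtype result (visited only grows) is a totality device, not extra logic.
def pvDfs (g : PySem.Dict Int (List Int)) (nbs : List Int) (v : PySem.Set Int) (r : List Int) :
    {p : (PySem.Set Int) × List Int // ∀ x ∈ v, x ∈ p.1} :=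
  match nbs with
  | [] => ⟨(v, r), fun _ hx => hx⟩
  | nb :: rest =>
    if h : nb ∈ v then
      pvDfs g rest v r
    else
      let c := pvDfs g (pvAdj g nb) (PySem.Set.add v nb) r
      let t := pvDfs g rest c.1.1 (c.1.2 ++ [nb])
      ⟨t.1, fun x hx => t.2 x (c.2 x (pvMemAddL hx))⟩
termination_by (pvMeas g nbs v, nbs.length)
decreasing_by
  · have hle : pvMeas g rest v ≤ pvMeas g (nb :: rest) v :=
      pvMeas_le g rest (nb :: rest) v v
        (fun y hy => Or.inr (List.mem_cons_of_mem _ hy)) (fun _ hy => hy)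
    rcases lt_or_eq_of_le hle with hlt | heq
    · exact Prod.Lex.left _ _ hlt
    · rw [heq]; exact Prod.Lex.right _ (by simp)
  · apply Prod.Lex.left
    exact pvMeas_lt g (pvAdj g nb) (nb :: rest) v (PySem.Set.add v nb) nb
      (fun y hy => Or.inl (pvAdj_subset g nb y hy))
      (fun y hy => pvMemAddL hy)
      (List.mem_cons_self) h (pvMemAddSelf _ _)
  · apply Prod.Lex.left
    exact pvMeas_lt g rest (nb :: rest) v c.1.1 nb
      (fun y hy => Or.inr (List.mem_cons_of_mem _ hy))
      (fun y hy => c.2 y (pvMemAddL hy))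
      (List.mem_cons_self) h (c.2 nb (pvMemAddSelf _ _))

def build_sorted_shots (comparisons : List (Int × Int × Int)) : List Int :=
  let g := pvGraph comparisons
  (pvDfs g g.keys PySem.Set.empty []).1.2

-- ===== PORT B =====
-- B's while-loop over the explicit stack of (node, remaining-neighbours) frames.
def pvRun (g : PySem.Dict Int (List Int)) (st : List (Int × List Int))
    (v : PySem.Set Int) (r : List Int) : (PySem.Set Int) × List Int :=
  match st with
  | [] => (v, r)
  | (node, nbs) :: st' =>
    match nbs with
    | [] => pvRun g st' v (r ++ [node])
    | nb :: rest =>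
      if nb ∈ v then pvRun g ((node, rest) :: st') v r
      else pvRun g ((nb, pvAdj g nb) :: (node, rest) :: st') (PySem.Set.add v nb) r
termination_by (pvMeas g (st.flatMap (fun f => f.2)) v, (st.map (fun f => f.2.length + 1)).sum)
decreasing_by
  · apply Prod.Lex.right
    simp
  · have hle : pvMeas g (((node, rest) :: st').flatMap (fun f => f.2)) v ≤
        pvMeas g (((node, nb :: rest) :: st').flatMap (fun f => f.2)) v := by
      apply pvMeas_le g _ _ v v ?_ (fun _ hy => hy)
      intro y hy
      simp only [List.flatMap_cons, List.mem_append] at hy ⊢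
      rcases hy with hy | hy
      · exact Or.inr (Or.inl (List.mem_cons_of_mem _ hy))
      · exact Or.inr (Or.inr hy)
    rcases lt_or_eq_of_le hle with hlt | heq
    · exact Prod.Lex.left _ _ hlt
    · rw [heq]; exact Prod.Lex.right _ (by simp)
  · apply Prod.Lex.left
    apply pvMeas_lt g _ _ v (PySem.Set.add v nb) nb ?_
      (fun y hy => pvMemAddL hy) ?_ ‹nb ∉ v›
      (pvMemAddSelf _ _)
    · intro y hy
      simp only [List.flatMap_cons, List.mem_append] at hy
      rcases hy with hy | hy | hy
      · exact Or.inl (pvAdj_subset g nb y hy)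
      · exact Or.inr (by simp [hy])
      · exact Or.inr (by simp [hy])
    · simp

-- B's outer loop over the snapshot of the graph's keys.
def pvTop (g : PySem.Dict Int (List Int)) : List Int → PySem.Set Int → List Int → List Int
  | [], _, r => r
  | k :: ks, v, r =>
    if k ∈ v then pvTop g ks v r
    else
      let p := pvRun g [(k, pvAdj g k)] (PySem.Set.add v k) r
      pvTop g ks p.1 p.2

def build_sorted_shots_alt (comparisons : List (Int × Int × Int)) : List Int :=
  let g := pvGraph comparisons
  pvTop g g.keys PySem.Set.empty []

-- ===== PRECONDITION & SPEC =====
def Spec_build_sorted_shots (comparisons : List (Int × Int × Int)) (out : List Int) : Prop := out = build_sorted_shots_alt comparisons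
instance (comparisons : List (Int × Int × Int)) (out : List Int) : Decidable (Spec_build_sorted_shots comparisons out) := by unfold Spec_build_sorted_shots; infer_instance

-- ===== CLAIM (what is proved, stated in full; the proofs are below) =====
def Claim_equal_build_sorted_shots : Prop := ∀ (comparisons : List (Int × Int × Int)), Dom_build_sorted_shots comparisons → Spec_build_sorted_shots comparisons (build_sorted_shots comparisons)

-- ===== LEMMAS AND PROOFS =====

theorem pvMeas_pos (g : PySem.Dict Int (List Int)) (B v : List Int) (x : Int)
    (hxB : x ∈ B) (hxv : x ∉ v) : 0 < pvMeas g B v := by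
  apply Finset.card_pos.mpr
  exact ⟨x, by simp [List.mem_toFinset, hxB, hxv]⟩

-- step equations for pvDfs (first component of the subtype)
theorem pvDfs_nil (g : PySem.Dict Int (List Int)) (v : PySem.Set Int) (r : List Int) :
    (pvDfs g [] v r).1 = (v, r) := by rw [pvDfs]

theorem pvDfs_skip (g : PySem.Dict Int (List Int)) {nb : Int} {v : PySem.Set Int}
    (rest : List Int) (r : List Int) (h : nb ∈ v) :
    (pvDfs g (nb :: rest) v r).1 = (pvDfs g rest v r).1 := by
  rw [pvDfs]; simp [h]

theorem pvDfs_go (g : PySem.Dict Int (List Int)) {nb : Int} {v : PySem.Set Int}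
    (rest : List Int) (r : List Int) (h : nb ∉ v) :
    (pvDfs g (nb :: rest) v r).1 =
      (pvDfs g rest (pvDfs g (pvAdj g nb) (PySem.Set.add v nb) r).1.1
        ((pvDfs g (pvAdj g nb) (PySem.Set.add v nb) r).1.2 ++ [nb])).1 := by
  rw [pvDfs]; simp [h]

-- step equations for pvRun
theorem pvRun_nil (g : PySem.Dict Int (List Int)) (v : PySem.Set Int) (r : List Int) :
    pvRun g [] v r = (v, r) := by rw [pvRun]

theorem pvRun_pop (g : PySem.Dict Int (List Int)) (node : Int) (st : List (Int × List Int))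
    (v : PySem.Set Int) (r : List Int) :
    pvRun g ((node, []) :: st) v r = pvRun g st v (r ++ [node]) := by rw [pvRun]

theorem pvRun_skip (g : PySem.Dict Int (List Int)) (node nb : Int) (rest : List Int)
    (st : List (Int × List Int)) (v : PySem.Set Int) (r : List Int) (h : nb ∈ v) :
    pvRun g ((node, nb :: rest) :: st) v r = pvRun g ((node, rest) :: st) v r := by
  rw [pvRun]; simp [h]

theorem pvRun_push (g : PySem.Dict Int (List Int)) (node nb : Int) (rest : List Int)
    (st : List (Int × List Int)) (v : PySem.Set Int) (r : List Int) (h : nb ∉ v) :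
    pvRun g ((node, nb :: rest) :: st) v r =
      pvRun g ((nb, pvAdj g nb) :: (node, rest) :: st) (PySem.Set.add v nb) r := by
  rw [pvRun]; simp [h]

-- the simulation: one stack frame behaves exactly like one recursive dfs call list
theorem pvRun_frame (g : PySem.Dict Int (List Int)) :
    ∀ (c : Nat) (v : PySem.Set Int) (nbs : List Int), pvMeas g nbs v ≤ c →
    ∀ (node : Int) (st : List (Int × List Int)) (r : List Int),
      pvRun g ((node, nbs) :: st) v r =
        pvRun g st (pvDfs g nbs v r).1.1 ((pvDfs g nbs v r).1.2 ++ [node]) := by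
  intro c
  induction c with
  | zero =>
    intro v nbs
    induction nbs with
    | nil => intro _ node st r; rw [pvRun_pop, pvDfs_nil]
    | cons nb rest ih =>
      intro hb node st r
      by_cases h : nb ∈ v
      · rw [pvRun_skip g node nb rest st v r h, pvDfs_skip g rest r h]
        exact ih (le_trans (pvMeas_le g rest (nb :: rest) v v
          (fun y hy => Or.inr (List.mem_cons_of_mem _ hy)) (fun _ hy => hy)) hb) node st r
      · exfalso
        have h1 := pvMeas_pos g (nb :: rest) v nb List.mem_cons_self h
        omega
  | succ c ihc =>
    intro v nbs
    induction nbs with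
    | nil => intro _ node st r; rw [pvRun_pop, pvDfs_nil]
    | cons nb rest ih =>
      intro hb node st r
      by_cases h : nb ∈ v
      · rw [pvRun_skip g node nb rest st v r h, pvDfs_skip g rest r h]
        exact ih (le_trans (pvMeas_le g rest (nb :: rest) v v
          (fun y hy => Or.inr (List.mem_cons_of_mem _ hy)) (fun _ hy => hy)) hb) node st r
      · have hb1 : pvMeas g (pvAdj g nb) (PySem.Set.add v nb) ≤ c := by
          have := pvMeas_lt g (pvAdj g nb) (nb :: rest) v (PySem.Set.add v nb) nb
            (fun y hy => Or.inl (pvAdj_subset g nb y hy))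
            (fun y hy => pvMemAddL hy)
            List.mem_cons_self h (pvMemAddSelf _ _)
          omega
        have hb2 : pvMeas g rest (pvDfs g (pvAdj g nb) (PySem.Set.add v nb) r).1.1 ≤ c := by
          have := pvMeas_lt g rest (nb :: rest) v
            (pvDfs g (pvAdj g nb) (PySem.Set.add v nb) r).1.1 nb
            (fun y hy => Or.inr (List.mem_cons_of_mem _ hy))
            (fun y hy => (pvDfs g (pvAdj g nb) (PySem.Set.add v nb) r).2 y
              (pvMemAddL hy))
            List.mem_cons_self h
            ((pvDfs g (pvAdj g nb) (PySem.Set.add v nb) r).2 nb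
              (pvMemAddSelf _ _))
          omega
        rw [pvRun_push g node nb rest st v r h,
            ihc (PySem.Set.add v nb) (pvAdj g nb) hb1 nb ((node, rest) :: st) r,
            ihc _ rest hb2 node st _, pvDfs_go g rest r h]

-- B's outer loop equals A's outer loop
theorem pvTop_eq (g : PySem.Dict Int (List Int)) :
    ∀ (ks : List Int) (v : PySem.Set Int) (r : List Int),
      pvTop g ks v r = (pvDfs g ks v r).1.2 := by
  intro ks
  induction ks with
  | nil => intro v r; rw [pvTop, pvDfs]
  | cons k ks ih =>
    intro v r
    by_cases h : k ∈ v
    · rw [pvTop]; simp only [h, if_true]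
      rw [ih, pvDfs_skip g ks r h]
    · rw [pvTop]; simp only [h, if_false]
      rw [pvRun_frame g (pvMeas g (pvAdj g k) (PySem.Set.add v k)) (PySem.Set.add v k)
            (pvAdj g k) (le_refl _) k [] r,
          pvRun_nil, ih, pvDfs_go g ks r h]

-- ===== VERDICT (by name: the statement is the Claim_ definition above) =====
theorem build_sorted_shots_spec : Claim_equal_build_sorted_shots := by
  intro comparisons _
  unfold Spec_build_sorted_shots build_sorted_shots build_sorted_shots_alt
  rw [pvTop_eq]
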